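-- pv_equiv track=rewrite | github.com/Computer-engineering-FICT/Computer-engineering-FICT | V семестр/Системне програмування - 2/Бровченко/sys_prog/lab1/functions.py | filter_return
-- ===== SOURCE A (Python) =====
-- def filter_return(list_of_p: list):
--     tmp = []
--     for i in list_of_p:
--         tmp.append(i[1])
--     max_piece = max(tmp)
--     tmp = []
--     for i in list_of_p:
--         if i[1] == max_piece:
--             tmp.append(i[0])
--     return max_piece, tmp
-- ===== SOURCE B (Python) =====
-- def filter_return(list_of_p: list):
--     groups = {}
--     for a, b in list_of_p:
--         groups.setdefault(b, []).append(a)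
--     max_piece = max(groups)
--     return max_piece, groups[max_piece]
-- ===== Notes on version B (the rewrite author's own statement) =====
-- stated objective: alternative
-- what changed: Replaces A's two passes (collect all second values, take max, then re-scan filtering firsts) with a single group-by pass building a dict from second-value to list of first-values, followed by max over the dict keys and one keyed lookup.
import Mathlib
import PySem

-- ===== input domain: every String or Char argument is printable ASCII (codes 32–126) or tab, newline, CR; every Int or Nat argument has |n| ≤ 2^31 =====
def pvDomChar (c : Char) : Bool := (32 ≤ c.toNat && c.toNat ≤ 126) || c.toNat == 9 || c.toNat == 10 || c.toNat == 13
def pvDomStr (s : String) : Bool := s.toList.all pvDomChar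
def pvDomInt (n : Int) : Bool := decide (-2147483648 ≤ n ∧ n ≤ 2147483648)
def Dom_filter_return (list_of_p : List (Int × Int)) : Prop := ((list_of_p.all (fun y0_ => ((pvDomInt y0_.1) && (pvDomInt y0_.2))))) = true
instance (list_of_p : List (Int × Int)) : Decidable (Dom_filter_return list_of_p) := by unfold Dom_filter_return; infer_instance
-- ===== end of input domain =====

-- B groups first-values by second-value in one dict-building pass, then takes max over the
-- dict keys and one lookup, instead of A's two passes (max of seconds, then filter firsts).

-- ===== PORT A =====
def filter_return (list_of_p : List (Int × Int)) : Int × List Int :=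
  let tmp := list_of_p.foldl (fun acc i => acc ++ [i.2]) []
  match PySem.List.max? tmp (fun x => x) with
  | none => (0, [])  -- unreachable under Pre_: Python's max of an empty sequence raises ValueError
  | some max_piece =>
      let tmp2 := list_of_p.foldl (fun acc i => if i.2 == max_piece then acc ++ [i.1] else acc) []
      (max_piece, tmp2)

-- ===== PORT B =====
def filter_return_alt (list_of_p : List (Int × Int)) : Int × List Int :=
  let groups : PySem.Dict Int (List Int) :=
    list_of_p.foldl (fun d p => d.modify p.2 [] (· ++ [p.1])) PySem.Dict.empty
  match PySem.List.max? groups.keys (fun x => x) with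
  | none => (0, [])  -- unreachable under Pre_: Python's max over an empty dict raises ValueError
  | some max_piece => (max_piece, groups.getD max_piece [])

-- ===== PRECONDITION & SPEC =====
-- Python's max of an empty sequence raises ValueError, so A (and B) raise on the empty list.
def Pre_filter_return (list_of_p : List (Int × Int)) : Prop := list_of_p ≠ []
instance (list_of_p : List (Int × Int)) : Decidable (Pre_filter_return list_of_p) := by unfold Pre_filter_return; infer_instance
def pvWitness_filter_return : (List (Int × Int)) := [(1, 2), (3, 2)]

def Spec_filter_return (list_of_p : List (Int × Int)) (out : Int × List Int) : Prop := out = filter_return_alt list_of_p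
instance (list_of_p : List (Int × Int)) (out : Int × List Int) : Decidable (Spec_filter_return list_of_p out) := by unfold Spec_filter_return; infer_instance

-- ===== CLAIM (what is proved, stated in full; the proofs are below) =====
def Claim_equal_filter_return : Prop := ∀ (list_of_p : List (Int × Int)), Dom_filter_return list_of_p → Pre_filter_return list_of_p → Spec_filter_return list_of_p (filter_return list_of_p)

-- ===== LEMMAS AND PROOFS =====

-- max over the distinct elements (the dict's key set) equals max over the raw list
theorem max?_ofList_eq (xs : List Int) :
    PySem.List.max? (PySem.Set.ofList xs) (fun x => x) = PySem.List.max? xs (fun x => x) := by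
  rcases hx : PySem.List.max? xs (fun x => x) with _ | a
  · rw [PySem.List.max?_eq_none_iff] at hx
    subst hx; rfl
  · rcases hy : PySem.List.max? (PySem.Set.ofList xs) (fun x => x) with _ | b
    · rw [PySem.List.max?_eq_none_iff] at hy
      have ha := PySem.List.max?_mem hx
      have : a ∈ PySem.Set.ofList xs := (PySem.Set.mem_ofList _ _).mpr ha
      rw [hy] at this; simp at this
    · have ha := PySem.List.max?_mem hx
      have hb := PySem.List.max?_mem hy
      have h1 := PySem.List.max?_isMax hy a ((PySem.Set.mem_ofList _ _).mpr ha)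
      have h2 := PySem.List.max?_isMax hx b ((PySem.Set.mem_ofList _ _).mp hb)
      exact congrArg some (le_antisymm h2 h1)


theorem keys_groups (l : List (Int × Int)) :
    (l.foldl (fun d p => d.modify p.2 [] (· ++ [p.1])) (PySem.Dict.empty : PySem.Dict Int (List Int))).keys
      = PySem.Set.ofList (l.map Prod.snd) := by
  rw [PySem.Dict.keys_foldl_modify_key]
  rfl

theorem getD_groups (l : List (Int × Int)) (c : Int) :
    (l.foldl (fun d p => d.modify p.2 [] (· ++ [p.1])) (PySem.Dict.empty : PySem.Dict Int (List Int))).getD c []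
      = (l.filter (fun i => i.2 == c)).map (fun i => i.1) := by
  have h : l.foldl (fun d p => d.modify p.2 [] (· ++ [p.1])) (PySem.Dict.empty : PySem.Dict Int (List Int))
      = (l.map Prod.swap).foldl (fun d p => d.modify p.1 [] (· ++ [p.2])) PySem.Dict.empty := by
    rw [List.foldl_map]; rfl
  rw [h, PySem.Dict.getD_foldl_modify_append]
  simp [List.filter_map, Function.comp_def, Prod.swap]

theorem filter_return_spec : Claim_equal_filter_return := by
  intro l _ _
  unfold Spec_filter_return filter_return filter_return_alt
  simp only [keys_groups, max?_ofList_eq, PySem.List.foldl_append_singleton_eq_map,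
    List.nil_append]
  rcases h : PySem.List.max? (l.map Prod.snd) (fun x => x) with _ | m
  · rfl
  · simp only [getD_groups, PySem.List.foldl_append_if, List.nil_append]
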